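-- pv_equiv track=rewrite | github.com/ShaneWaxwing/uno_chat | uno.py | top_card_checker
-- ===== SOURCE A (Python) =====
-- def top_card_checker(deck): #---------------------------------------> Ensures that the top card at the begining of the game is a number card.
--     top_card = deck[0]
--     status = False
--     for char in top_card:
--         num = ord(char)
--         if num != 33:
--             status = False
--         else:
--             status = True
--     return status
-- ===== SOURCE B (Python) =====
-- def top_card_checker(deck):
--     top_card = deck[0]
--     return bool(top_card) and top_card[-1] == '!'
-- ===== Notes on version B (the rewrite author's own statement) =====
-- stated objective: simpler
-- what changed: A scans every character of the top card, overwriting a status flag so only the last character matters; B drops the loop and directly tests whether the last character (top_card[-1]) is '!', guarded for the empty string.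
import Mathlib
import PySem

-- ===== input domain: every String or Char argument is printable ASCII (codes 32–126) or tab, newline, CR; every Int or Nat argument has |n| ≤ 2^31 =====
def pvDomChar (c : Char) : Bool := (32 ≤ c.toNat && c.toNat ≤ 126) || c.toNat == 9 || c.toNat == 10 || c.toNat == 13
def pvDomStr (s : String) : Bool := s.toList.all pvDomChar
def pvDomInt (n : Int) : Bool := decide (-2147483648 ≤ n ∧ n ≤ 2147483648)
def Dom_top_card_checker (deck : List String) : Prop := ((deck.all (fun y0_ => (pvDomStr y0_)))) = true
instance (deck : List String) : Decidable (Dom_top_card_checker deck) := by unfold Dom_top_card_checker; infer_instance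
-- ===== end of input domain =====

-- B replaces A's whole-string scan (whose flag only reflects the last character) with a direct
-- constant-size check of the last character; objective: simpler.

-- ===== PORT A =====
def top_card_checker (deck : List String) : Bool :=
  match PySem.List.pyGet? deck 0 with
  | none => false  -- deck[0] raises IndexError; excluded by Pre_
  | some top_card =>
    top_card.toList.foldl (fun _status char =>
      let num := char.toNat
      if num ≠ 33 then false else true) false

-- ===== PORT B =====
def top_card_checker_alt (deck : List String) : Bool :=
  match PySem.List.pyGet? deck 0 with
  | none => false  -- deck[0] raises IndexError; excluded by Pre_
  | some top_card =>
    decide (top_card.toList ≠ []) && (PySem.Str.pyGet? top_card (-1) == some '!')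

-- ===== PRECONDITION & SPEC =====
-- Pre_ excludes only the empty deck, on which A (and B) raise IndexError at deck[0].
def Pre_top_card_checker (deck : List String) : Prop := deck ≠ []
instance (deck : List String) : Decidable (Pre_top_card_checker deck) := by unfold Pre_top_card_checker; infer_instance
def pvWitness_top_card_checker : List String := (["9!", "red 4"])
def Spec_top_card_checker (deck : List String) (out : Bool) : Prop := out = top_card_checker_alt deck
instance (deck : List String) (out : Bool) : Decidable (Spec_top_card_checker deck out) := by unfold Spec_top_card_checker; infer_instance

-- ===== CLAIM (what is proved, stated in full; the proofs are below) =====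
def Claim_equal_top_card_checker : Prop := ∀ (deck : List String), Dom_top_card_checker deck → Pre_top_card_checker deck → Spec_top_card_checker deck (top_card_checker deck)

-- ===== LEMMAS AND PROOFS =====

-- A's loop overwrites the flag at every step, so its result is determined by the last character.
theorem foldl_flag_eq_getLast (l : List Char) (acc : Bool) :
    l.foldl (fun _status char =>
      let num := char.toNat
      if num ≠ 33 then false else true) acc
    = (match l.getLast? with
       | none => acc
       | some c => decide (c.toNat = 33)) := by
  induction l generalizing acc with
  | nil => rfl
  | cons c rest ih =>
    cases rest with
    | nil => simp [List.foldl]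
    | cons d rest' =>
      rw [List.foldl_cons, ih]
      obtain ⟨e, hg⟩ : ∃ e, (d :: rest').getLast? = some e := by
        cases h' : (d :: rest').getLast? <;> simp_all
      simp [hg]

theorem char_bang (c : Char) : decide (c.toNat = 33) = decide (c = '!') := by
  rcases c with ⟨v, h⟩
  simp [Char.toNat, Char.ext_iff, UInt32.ext_iff]

-- ===== VERDICT (by name: the statement is the Claim_ definition above) =====
theorem top_card_checker_spec : Claim_equal_top_card_checker := by
  intro deck _ _
  unfold Spec_top_card_checker top_card_checker top_card_checker_alt
  cases h : PySem.List.pyGet? deck 0 with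
  | none => rfl
  | some t =>
    simp only [foldl_flag_eq_getLast]
    have hb : PySem.Str.pyGet? t (-1) = t.toList.getLast? := by
      simp [PySem.Str.pyGet?, PySem.List.pyGet?_neg_one]
    rw [hb]
    cases hl : t.toList.getLast? with
    | none => simp [List.getLast?_eq_none_iff.mp hl]
    | some c =>
      have : t.toList ≠ [] := by
        intro he; rw [he] at hl; simp at hl
      simp [this, char_bang]
      cases hc : (c == '!') <;> simp_all
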